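-- pv_equiv track=rewrite | github.com/Laziz200/python-takrorlash | funcsiya/task02.py | sort_odd_even
-- ===== SOURCE A (Python) =====
-- def sort_odd_even(lst):
--     odd = sorted([x for x in lst if x % 2 != 0])
--     even = sorted([x for x in lst if x % 2 == 0], reverse=True)
--
--     result = []
--     odd_index = 0
--     even_index = 0
--
--     for x in lst:
--         if x % 2 != 0:
--             result.append(odd[odd_index])
--             odd_index += 1
--         else:
--             result.append(even[even_index])
--             even_index += 1
--
--     return result
-- ===== SOURCE B (Python) =====
-- def sort_odd_even(lst):
--     # Selection-based: no sorting at all. Keep pools of the remaining odd and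
--     # even values; at each odd-valued position extract the minimum remaining
--     # odd, at each even-valued position the maximum remaining even.
--     odds = [x for x in lst if x % 2 != 0]
--     evens = [x for x in lst if x % 2 == 0]
--     out = []
--     for x in lst:
--         if x % 2 != 0:
--             m = min(odds)
--             odds.remove(m)
--         else:
--             m = max(evens)
--             evens.remove(m)
--         out.append(m)
--     return out
-- ===== Notes on version B (the rewrite author's own statement) =====
-- stated objective: alternative
-- what changed: B never sorts: it keeps two pools of the remaining odd/even values and at each position extracts the minimum remaining odd (or maximum remaining even) by repeated selection, instead of A's pre-sorting of both groups and counter-driven merge.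
import Mathlib
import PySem

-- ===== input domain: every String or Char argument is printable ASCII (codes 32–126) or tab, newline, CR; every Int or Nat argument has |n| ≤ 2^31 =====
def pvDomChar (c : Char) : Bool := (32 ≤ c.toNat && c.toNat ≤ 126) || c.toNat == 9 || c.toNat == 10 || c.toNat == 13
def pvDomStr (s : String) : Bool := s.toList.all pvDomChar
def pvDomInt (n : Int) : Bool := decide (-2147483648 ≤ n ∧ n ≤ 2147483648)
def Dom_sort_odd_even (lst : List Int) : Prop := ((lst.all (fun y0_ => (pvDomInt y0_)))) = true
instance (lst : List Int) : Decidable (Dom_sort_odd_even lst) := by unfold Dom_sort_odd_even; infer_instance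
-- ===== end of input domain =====

-- B replaces A's sort-both-groups-then-merge with repeated selection: it never sorts,
-- keeping pools of the remaining odd/even values and extracting min/max at each position
-- (alternative algorithm; not faster).


-- ===== PORT A =====
-- Literal port: odd/even sorted lists, then one loop over lst appending odd[odd_index] /
-- even[even_index].  The indexing is ported with pyGetD; the index is always in range
-- (the counter never exceeds the number of elements of that parity), so Python never raises.
def sort_odd_even (lst : List Int) : List Int :=
  let odd := PySem.List.sorted (lst.filter (fun x => PySem.Int.mod x 2 != 0)) (fun x => x) false
  let even := PySem.List.sorted (lst.filter (fun x => PySem.Int.mod x 2 == 0)) (fun x => x) true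
  (lst.foldl (fun (s : List Int × Nat × Nat) x =>
      if PySem.Int.mod x 2 != 0 then
        (s.1 ++ [PySem.List.pyGetD odd (s.2.1 : Int) 0], s.2.1 + 1, s.2.2)
      else
        (s.1 ++ [PySem.List.pyGetD even (s.2.2 : Int) 0], s.2.1, s.2.2 + 1))
    ([], 0, 0)).1

-- ===== PORT B =====
-- Literal port of Source B's loop: state (out, odds pool, evens pool); min/max ported with
-- PySem.List.min?/max? and remove with PySem.List.remove?, with .getD defaults — exact
-- because each pool is nonempty whenever its branch runs (the pools hold exactly the
-- values of that parity still to be placed), so Python's min/max/remove never raise.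
def sort_odd_even_alt (lst : List Int) : List Int :=
  let odds := lst.filter (fun x => PySem.Int.mod x 2 != 0)
  let evens := lst.filter (fun x => PySem.Int.mod x 2 == 0)
  (lst.foldl (fun (s : List Int × List Int × List Int) x =>
      if PySem.Int.mod x 2 != 0 then
        let m := (PySem.List.min? s.2.1 (fun y => y)).getD 0
        (s.1 ++ [m], (PySem.List.remove? s.2.1 m).getD s.2.1, s.2.2)
      else
        let m := (PySem.List.max? s.2.2 (fun y => y)).getD 0
        (s.1 ++ [m], s.2.1, (PySem.List.remove? s.2.2 m).getD s.2.2))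
    ([], odds, evens)).1

-- ===== PRECONDITION & SPEC =====
def Spec_sort_odd_even (lst : List Int) (out : List Int) : Prop := out = sort_odd_even_alt lst
instance (lst : List Int) (out : List Int) : Decidable (Spec_sort_odd_even lst out) := by unfold Spec_sort_odd_even; infer_instance

-- ===== CLAIM (what is proved, stated in full; the proofs are below) =====
def Claim_equal_sort_odd_even : Prop := ∀ (lst : List Int), Dom_sort_odd_even lst → Spec_sort_odd_even lst (sort_odd_even lst)

-- ===== LEMMAS AND PROOFS =====

/-- Common reference: consume the head of `O` at q-positions, of `E` elsewhere. -/
def pvMerge (q : Int → Bool) : List Int → List Int → List Int → List Int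
  | [], _, _ => []
  | x :: xs, O, E =>
    if q x then O.headD 0 :: pvMerge q xs O.tail E else E.headD 0 :: pvMerge q xs O E.tail

theorem pvMerge_cons (q : Int → Bool) (x : Int) (xs O E : List Int) :
    pvMerge q (x :: xs) O E =
      if q x then O.headD 0 :: pvMerge q xs O.tail E else E.headD 0 :: pvMerge q xs O E.tail := rfl

/-- A's loop with running counters equals the head-consuming merge of the drops. -/
theorem pvFoldA (q : Int → Bool) (O E : List Int) :
    ∀ (lst : List Int) (acc : List Int) (oi ei : Nat),
    (lst.foldl (fun (s : List Int × Nat × Nat) x =>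
        if q x then
          (s.1 ++ [PySem.List.pyGetD O (s.2.1 : Int) 0], s.2.1 + 1, s.2.2)
        else
          (s.1 ++ [PySem.List.pyGetD E (s.2.2 : Int) 0], s.2.1, s.2.2 + 1))
      (acc, oi, ei)).1 = acc ++ pvMerge q lst (O.drop oi) (E.drop ei) := by
  intro lst
  induction lst with
  | nil => intro acc oi ei; simp [pvMerge]
  | cons x xs ih =>
    intro acc oi ei
    by_cases h : q x = true
    · rw [List.foldl_cons, if_pos h, ih, pvMerge_cons, if_pos h]
      rw [show O.drop (oi + 1) = (O.drop oi).tail from (List.tail_drop ..).symm]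
      rw [show PySem.List.pyGetD O (oi : Int) 0 = (O.drop oi).headD 0 by
        simp [PySem.List.pyGetD_natCast, List.getD, List.headD_eq_head?_getD, List.head?_drop]]
      simp
    · rw [List.foldl_cons, if_neg h, ih, pvMerge_cons, if_neg h]
      rw [show E.drop (ei + 1) = (E.drop ei).tail from (List.tail_drop ..).symm]
      rw [show PySem.List.pyGetD E (ei : Int) 0 = (E.drop ei).headD 0 by
        simp [PySem.List.pyGetD_natCast, List.getD, List.headD_eq_head?_getD, List.head?_drop]]
      simp

/-- Extracting the minimum of a nonempty pool and erasing it: the min is the head of the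
ascending sort of the pool and the remaining pool sorts to its tail. -/
theorem pvMinStep (O : List Int) (hO : O ≠ []) :
    ∃ m t, PySem.List.min? O (fun y => y) = some m ∧
      PySem.List.sorted O (fun y => y) false = m :: t ∧
      PySem.List.sorted (O.erase m) (fun y => y) false = t ∧ m ∈ O := by
  obtain ⟨m, hm⟩ : ∃ m, PySem.List.min? O (fun y => y) = some m := by
    cases h : PySem.List.min? O (fun y => y) with
    | none => exact absurd ((PySem.List.min?_eq_none_iff O _).mp h) hO
    | some m => exact ⟨m, rfl⟩
  have hmem := PySem.List.min?_mem hm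
  obtain ⟨h0, t, hS⟩ : ∃ h0 t, PySem.List.sorted O (fun y => y) false = h0 :: t := by
    cases h : PySem.List.sorted O (fun y => y) false with
    | nil => exact absurd ((PySem.List.sorted_eq_nil_iff O _ _).mp h) hO
    | cons h0 t => exact ⟨h0, t, rfl⟩
  have hh0 : h0 = m := by
    have h1 : h0 ≤ m := PySem.List.key_head_sorted_le O (fun y => y) hS m hmem
    have h2 : m ≤ h0 := PySem.List.min?_isMin hm h0
      ((PySem.List.mem_sorted O (fun y => y) false h0).mp (hS ▸ List.mem_cons_self))
    omega
  subst hh0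
  refine ⟨h0, t, hm, hS, ?_, hmem⟩
  have hperm : t.Perm (O.erase h0) := by
    have := (PySem.List.sorted_perm O (fun y => y) false).erase h0
    rw [hS, List.erase_cons_head] at this
    exact this
  have hpw : t.Pairwise (fun a b : Int => a ≤ b) := by
    have := PySem.List.sorted_pairwise O (fun y => y)
    rw [hS] at this
    exact this.of_cons
  exact PySem.List.sorted_id_eq_of_perm_of_pairwise (O.erase h0) t hperm hpw

/-- Extracting the maximum of a nonempty pool and erasing it: the max heads the descending
sort and the remaining pool sorts (descending) to its tail. -/
theorem pvMaxStep (E : List Int) (hE : E ≠ []) :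
    ∃ m t, PySem.List.max? E (fun y => y) = some m ∧
      PySem.List.sorted E (fun y => y) true = m :: t ∧
      PySem.List.sorted (E.erase m) (fun y => y) true = t ∧ m ∈ E := by
  obtain ⟨m, hm⟩ : ∃ m, PySem.List.max? E (fun y => y) = some m := by
    cases h : PySem.List.max? E (fun y => y) with
    | none => exact absurd ((PySem.List.max?_eq_none_iff E _).mp h) hE
    | some m => exact ⟨m, rfl⟩
  have hmem := PySem.List.max?_mem hm
  obtain ⟨h0, t, hS⟩ : ∃ h0 t, PySem.List.sorted E (fun y => y) true = h0 :: t := by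
    cases h : PySem.List.sorted E (fun y => y) true with
    | nil => exact absurd ((PySem.List.sorted_eq_nil_iff E _ _).mp h) hE
    | cons h0 t => exact ⟨h0, t, rfl⟩
  have hh0 : h0 = m := by
    have h1 : m ≤ h0 := PySem.List.key_head_sorted_rev_ge E (fun y => y) hS m hmem
    have h2 : h0 ≤ m := PySem.List.max?_isMax hm h0
      ((PySem.List.mem_sorted E (fun y => y) true h0).mp (hS ▸ List.mem_cons_self))
    omega
  subst hh0
  refine ⟨h0, t, hm, hS, ?_, hmem⟩
  have hperm : (PySem.List.sorted (E.erase h0) (fun y => y) true).Perm t := by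
    have h3 : t.Perm (E.erase h0) := by
      have := (PySem.List.sorted_perm E (fun y => y) true).erase h0
      rw [hS, List.erase_cons_head] at this
      exact this
    exact ((PySem.List.sorted_perm (E.erase h0) (fun y => y) true).trans h3.symm)
  have hpw1 : (PySem.List.sorted (E.erase h0) (fun y => y) true).Pairwise (fun a b : Int => b ≤ a) :=
    PySem.List.sorted_pairwise_rev (E.erase h0) (fun y => y)
  have hpw2 : t.Pairwise (fun a b : Int => b ≤ a) := by
    have := PySem.List.sorted_pairwise_rev E (fun y => y)
    rw [hS] at this
    exact this.of_cons
  exact List.Perm.eq_of_pairwise (fun a b _ _ h1 h2 => le_antisymm h2 h1) hpw1 hpw2 hperm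

/-- B's selection loop equals the head-consuming merge of the sorted pools, provided the
pools are large enough to serve every position of their parity. -/
theorem pvFoldB (q : Int → Bool) :
    ∀ (xs acc O E : List Int),
    xs.countP q ≤ O.length → xs.countP (fun x => !(q x)) ≤ E.length →
    (xs.foldl (fun (s : List Int × List Int × List Int) x =>
        if q x then
          (s.1 ++ [(PySem.List.min? s.2.1 (fun y => y)).getD 0],
            (PySem.List.remove? s.2.1 ((PySem.List.min? s.2.1 (fun y => y)).getD 0)).getD s.2.1, s.2.2)
        else
          (s.1 ++ [(PySem.List.max? s.2.2 (fun y => y)).getD 0], s.2.1,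
            (PySem.List.remove? s.2.2 ((PySem.List.max? s.2.2 (fun y => y)).getD 0)).getD s.2.2))
      (acc, O, E)).1
      = acc ++ pvMerge q xs (PySem.List.sorted O (fun y => y) false)
                            (PySem.List.sorted E (fun y => y) true) := by
  intro xs
  induction xs with
  | nil => intro acc O E _ _; simp [pvMerge]
  | cons x xs ih =>
    intro acc O E hO hE
    by_cases h : q x = true
    · have hcnt : xs.countP q + 1 ≤ O.length := by
        rw [List.countP_cons, if_pos h] at hO; omega
      have hOne : O ≠ [] := by
        intro hnil; rw [hnil] at hcnt; simp at hcnt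
      obtain ⟨m, t, hmin, hS, hSe, hmem⟩ := pvMinStep O hOne
      rw [List.foldl_cons, if_pos h]
      simp only [hmin, Option.getD_some, PySem.List.remove?_eq_some_erase _ m hmem]
      rw [ih (acc ++ [m]) (O.erase m) E
        (by rw [List.length_erase_of_mem hmem]; omega)
        (by rw [List.countP_cons, if_neg (by simp [h])] at hE; omega)]
      rw [pvMerge_cons, if_pos h, hS, hSe]
      simp
    · have hcnt : xs.countP (fun x => !(q x)) + 1 ≤ E.length := by
        rw [List.countP_cons, if_pos (by simp [h])] at hE; omega
      have hEne : E ≠ [] := by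
        intro hnil; rw [hnil] at hcnt; simp at hcnt
      obtain ⟨m, t, hmax, hS, hSe, hmem⟩ := pvMaxStep E hEne
      rw [List.foldl_cons, if_neg h]
      simp only [hmax, Option.getD_some, PySem.List.remove?_eq_some_erase _ m hmem]
      rw [ih (acc ++ [m]) O (E.erase m)
        (by rw [List.countP_cons, if_neg h] at hO; omega)
        (by rw [List.length_erase_of_mem hmem]; omega)]
      rw [pvMerge_cons, if_neg h, hS, hSe]
      simp

-- ===== VERDICT (by name: the statement is the Claim_ definition above) =====
theorem sort_odd_even_spec : Claim_equal_sort_odd_even := by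
  intro lst _
  show sort_odd_even lst = sort_odd_even_alt lst
  have hq2 : (fun x : Int => PySem.Int.mod x 2 == 0) = (fun x => !(PySem.Int.mod x 2 != 0)) := by
    funext x; simp [bne]
  simp only [sort_odd_even, sort_odd_even_alt, hq2]
  have hA := pvFoldA (fun x => PySem.Int.mod x 2 != 0)
      (PySem.List.sorted (List.filter (fun x => PySem.Int.mod x 2 != 0) lst) (fun x => x) false)
      (PySem.List.sorted (List.filter (fun x => !(PySem.Int.mod x 2 != 0)) lst) (fun x => x) true)
      lst [] 0 0
  simp only [List.drop_zero, List.nil_append] at hA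
  rw [hA]
  have hB := pvFoldB (fun x => PySem.Int.mod x 2 != 0) lst []
      (List.filter (fun x => PySem.Int.mod x 2 != 0) lst)
      (List.filter (fun x => !(PySem.Int.mod x 2 != 0)) lst)
      (le_of_eq (List.countP_eq_length_filter ..))
      (le_of_eq (List.countP_eq_length_filter ..))
  simp only [List.nil_append] at hB
  rw [hB]
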